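-- pv_equiv track=rewrite | github.com/RelationalAI/logical-query-protocol | python-tools/src/meta/yacc_grammar.py | _split_bracket_type_args
-- ===== SOURCE A (Python) =====
-- from typing import Dict, List, Optional, Tuple, Set
--
-- def _split_bracket_type_args(text: str) -> List[str]:
--     """Split comma-separated type arguments respecting nested brackets."""
--     args = []
--     current = []
--     depth = 0
--
--     for char in text:
--         if char in '([':
--             depth += 1
--             current.append(char)
--         elif char in ')]':
--             depth -= 1
--             current.append(char)
--         elif char == ',' and depth == 0:
--             if current:
--                 args.append(''.join(current).strip())
--                 current = []
--         else:
--             current.append(char)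
--
--     if current:
--         args.append(''.join(current).strip())
--
--     return [a for a in args if a]
-- ===== SOURCE B (Python) =====
-- def _split_bracket_type_args(text: str) -> list:
--     """Split comma-separated type arguments respecting nested brackets.
--
--     Two passes: first record the index of every comma at bracket depth 0,
--     then slice the text between consecutive cut points, strip, and drop
--     empty pieces.  No per-argument character buffer is maintained.
--     """
--     cuts = []
--     depth = 0
--     for i, ch in enumerate(text):
--         if ch in '([':
--             depth += 1
--         elif ch in ')]':
--             depth -= 1
--         elif ch == ',' and depth == 0:
--             cuts.append(i)
--
--     parts = []
--     start = 0
--     for i in cuts + [len(text)]: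
--         parts.append(text[start:i].strip())
--         start = i + 1
--     return [p for p in parts if p]
-- ===== Notes on version B (the rewrite author's own statement) =====
-- stated objective: alternative
-- what changed: Replaces A's growing per-argument character buffer with a first pass that records the indices of depth-0 commas and a second pass that slices the text between consecutive cut points, stripping and dropping empty pieces.
import Mathlib
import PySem

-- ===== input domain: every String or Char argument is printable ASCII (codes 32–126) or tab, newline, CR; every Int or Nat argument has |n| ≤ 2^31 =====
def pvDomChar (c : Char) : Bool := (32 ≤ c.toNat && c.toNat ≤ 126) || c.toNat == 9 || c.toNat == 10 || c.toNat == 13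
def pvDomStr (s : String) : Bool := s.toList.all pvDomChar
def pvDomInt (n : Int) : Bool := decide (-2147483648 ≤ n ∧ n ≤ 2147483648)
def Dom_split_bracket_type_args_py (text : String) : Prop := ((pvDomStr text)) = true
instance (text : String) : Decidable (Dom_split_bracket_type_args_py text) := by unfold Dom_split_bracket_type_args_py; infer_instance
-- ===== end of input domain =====

-- B replaces A's per-argument character buffer by a first pass collecting the indices of
-- depth-0 commas and a second pass slicing the text between consecutive cut points
-- (objective: alternative decomposition, same linear cost).


-- ===== PORT A =====
-- one step of A's loop: state = (args, current, depth)
def pvStepA (st : List String × List Char × Int) (c : Char) : List String × List Char × Int :=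
  if c = '(' ∨ c = '[' then (st.1, st.2.1 ++ [c], st.2.2 + 1)
  else if c = ')' ∨ c = ']' then (st.1, st.2.1 ++ [c], st.2.2 - 1)
  else if c = ',' ∧ st.2.2 = 0 then
    if st.2.1 ≠ [] then (st.1 ++ [PySem.Str.strip (String.ofList st.2.1)], [], st.2.2)
    else st
  else (st.1, st.2.1 ++ [c], st.2.2)

def split_bracket_type_args_py (text : String) : List String :=
  let r := text.toList.foldl pvStepA ([], [], 0)
  let args := if r.2.1 ≠ [] then r.1 ++ [PySem.Str.strip (String.ofList r.2.1)] else r.1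
  args.filter (fun a => a ≠ "")

-- ===== PORT B =====
-- pass 1 step: state = (depth, cuts); records the index of each depth-0 comma
def pvStepCut (st : Int × List Int) (p : Int × Char) : Int × List Int :=
  if p.2 = '(' ∨ p.2 = '[' then (st.1 + 1, st.2)
  else if p.2 = ')' ∨ p.2 = ']' then (st.1 - 1, st.2)
  else if p.2 = ',' ∧ st.1 = 0 then (st.1, st.2 ++ [p.1])
  else st

-- pass 2 step: state = (parts, start); slices text[start:i] and strips it
def pvStepPart (text : String) (st : List String × Int) (i : Int) : List String × Int :=
  (st.1 ++ [PySem.Str.strip (PySem.Str.slice text (some st.2) (some i))], i + 1)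

def split_bracket_type_args_py_alt (text : String) : List String :=
  let cuts := ((PySem.List.enumerate text.toList 0).foldl pvStepCut (0, [])).2
  let parts := ((cuts ++ [(text.toList.length : Int)]).foldl (pvStepPart text) ([], 0)).1
  parts.filter (fun p => p ≠ "")

-- ===== PRECONDITION & SPEC =====
def Spec_split_bracket_type_args_py (text : String) (out : List String) : Prop := out = split_bracket_type_args_py_alt text
instance (text : String) (out : List String) : Decidable (Spec_split_bracket_type_args_py text out) := by unfold Spec_split_bracket_type_args_py; infer_instance

-- ===== CLAIM (what is proved, stated in full; the proofs are below) =====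
def Claim_equal_split_bracket_type_args_py : Prop := ∀ (text : String), Dom_split_bracket_type_args_py text → Spec_split_bracket_type_args_py text (split_bracket_type_args_py text)

-- ===== LEMMAS AND PROOFS =====

-- raw split of a char list at depth-0 commas (keeps empty segments); common reference point
def pvConsHead (c : Char) : List (List Char) → List (List Char)
  | [] => [[c]]
  | s :: ss => (c :: s) :: ss

def pvSegs : List Char → Int → List (List Char)
  | [], _ => [[]]
  | c :: cs, d =>
    if c = '(' ∨ c = '[' then pvConsHead c (pvSegs cs (d + 1))
    else if c = ')' ∨ c = ']' then pvConsHead c (pvSegs cs (d - 1))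
    else if c = ',' ∧ d = 0 then [] :: pvSegs cs d
    else pvConsHead c (pvSegs cs d)

theorem pvConsHead_ne_nil (c : Char) (l : List (List Char)) : pvConsHead c l ≠ [] := by
  cases l <;> simp [pvConsHead]

theorem pvSegs_ne_nil (cs : List Char) (d : Int) : pvSegs cs d ≠ [] := by
  cases cs with
  | nil => simp [pvSegs]
  | cons c cs =>
    simp only [pvSegs]
    split_ifs <;> first | exact pvConsHead_ne_nil _ _ | simp

def pvPrep (p : List Char) : List (List Char) → List (List Char)
  | [] => [p]
  | s :: ss => (p ++ s) :: ss

def pvEmit (l : List (List Char)) : List String :=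
  l.filterMap (fun s => if s = [] then none else some (PySem.Str.strip (String.ofList s)))

theorem pvPrep_consHead (p : List Char) (c : Char) (l : List (List Char)) :
    pvPrep p (pvConsHead c l) = pvPrep (p ++ [c]) l := by
  cases l <;> simp [pvPrep, pvConsHead]

theorem pvPrep_nil (l : List (List Char)) (h : l ≠ []) : pvPrep [] l = l := by
  cases l with
  | nil => exact absurd rfl h
  | cons s ss => simp [pvPrep]

theorem pvPrep_cons (p : List Char) (s : List Char) (ss : List (List Char)) :
    pvPrep p (s :: ss) = (p ++ s) :: ss := rfl

theorem pvEmit_nil_cons (l : List (List Char)) : pvEmit ([] :: l) = pvEmit l := by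
  simp [pvEmit]

theorem pvEmit_cons (s : List Char) (l : List (List Char)) (h : s ≠ []) :
    pvEmit (s :: l) = PySem.Str.strip (String.ofList s) :: pvEmit l := by
  simp [pvEmit, h]

def pvFinish (r : List String × List Char × Int) : List String :=
  if r.2.1 ≠ [] then r.1 ++ [PySem.Str.strip (String.ofList r.2.1)] else r.1

theorem pvStepA_open (args : List String) (cur : List Char) (d : Int) (c : Char)
    (h : c = '(' ∨ c = '[') : pvStepA (args, cur, d) c = (args, cur ++ [c], d + 1) := by
  simp [pvStepA, h]

theorem pvStepA_close (args : List String) (cur : List Char) (d : Int) (c : Char)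
    (h1 : ¬(c = '(' ∨ c = '[')) (h2 : c = ')' ∨ c = ']') :
    pvStepA (args, cur, d) c = (args, cur ++ [c], d - 1) := by
  simp [pvStepA, h1, h2]

theorem pvStepA_comma_nil (args : List String) (d : Int) (c : Char)
    (h1 : ¬(c = '(' ∨ c = '[')) (h2 : ¬(c = ')' ∨ c = ']')) (h3 : c = ',' ∧ d = 0) :
    pvStepA (args, [], d) c = (args, [], d) := by
  simp [pvStepA, h1, h2, h3]

theorem pvStepA_comma (args : List String) (cur : List Char) (d : Int) (c : Char)
    (h1 : ¬(c = '(' ∨ c = '[')) (h2 : ¬(c = ')' ∨ c = ']')) (h3 : c = ',' ∧ d = 0)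
    (hc : cur ≠ []) :
    pvStepA (args, cur, d) c = (args ++ [PySem.Str.strip (String.ofList cur)], [], d) := by
  simp [pvStepA, h1, h2, h3, hc]

theorem pvStepA_other (args : List String) (cur : List Char) (d : Int) (c : Char)
    (h1 : ¬(c = '(' ∨ c = '[')) (h2 : ¬(c = ')' ∨ c = ']')) (h3 : ¬(c = ',' ∧ d = 0)) :
    pvStepA (args, cur, d) c = (args, cur ++ [c], d) := by
  simp [pvStepA, h1, h2, h3]

theorem pvSegs_open (cs : List Char) (d : Int) (c : Char) (h : c = '(' ∨ c = '[') :
    pvSegs (c :: cs) d = pvConsHead c (pvSegs cs (d + 1)) := by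
  rw [pvSegs]; simp [h]

theorem pvSegs_close (cs : List Char) (d : Int) (c : Char)
    (h1 : ¬(c = '(' ∨ c = '[')) (h2 : c = ')' ∨ c = ']') :
    pvSegs (c :: cs) d = pvConsHead c (pvSegs cs (d - 1)) := by
  rw [pvSegs]; simp [h1, h2]

theorem pvSegs_comma (cs : List Char) (d : Int) (c : Char)
    (h1 : ¬(c = '(' ∨ c = '[')) (h2 : ¬(c = ')' ∨ c = ']')) (h3 : c = ',' ∧ d = 0) :
    pvSegs (c :: cs) d = [] :: pvSegs cs d := by
  rw [pvSegs]; simp [h1, h2, h3]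

theorem pvSegs_other (cs : List Char) (d : Int) (c : Char)
    (h1 : ¬(c = '(' ∨ c = '[')) (h2 : ¬(c = ')' ∨ c = ']')) (h3 : ¬(c = ',' ∧ d = 0)) :
    pvSegs (c :: cs) d = pvConsHead c (pvSegs cs d) := by
  rw [pvSegs]; simp [h1, h2, h3]

theorem pvRunA (cs : List Char) : ∀ (args : List String) (cur : List Char) (d : Int),
    pvFinish (cs.foldl pvStepA (args, cur, d)) = args ++ pvEmit (pvPrep cur (pvSegs cs d)) := by
  induction cs with
  | nil =>
    intro args cur d
    by_cases h : cur = [] <;> simp [pvFinish, pvPrep, pvEmit, pvSegs, h]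
  | cons c cs ih =>
    intro args cur d
    rw [List.foldl_cons]
    by_cases h1 : c = '(' ∨ c = '['
    · rw [pvStepA_open args cur d c h1, ih, pvSegs_open cs d c h1, pvPrep_consHead]
    · by_cases h2 : c = ')' ∨ c = ']'
      · rw [pvStepA_close args cur d c h1 h2, ih, pvSegs_close cs d c h1 h2, pvPrep_consHead]
      · by_cases h3 : c = ',' ∧ d = 0
        · rw [pvSegs_comma cs d c h1 h2 h3, pvPrep_cons]
          by_cases hc : cur = []
          · subst hc
            rw [pvStepA_comma_nil args d c h1 h2 h3, ih,
                pvPrep_nil _ (pvSegs_ne_nil cs d), List.nil_append, pvEmit_nil_cons]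
          · rw [pvStepA_comma args cur d c h1 h2 h3 hc, ih,
                pvPrep_nil _ (pvSegs_ne_nil cs d), List.append_nil,
                pvEmit_cons _ _ hc, List.append_assoc]
            rfl
        · rw [pvStepA_other args cur d c h1 h2 h3, ih, pvSegs_other cs d c h1 h2 h3,
              pvPrep_consHead]

theorem pvA_eq (text : String) :
    split_bracket_type_args_py text
      = (pvEmit (pvSegs text.toList 0)).filter (fun a => a ≠ "") := by
  unfold split_bracket_type_args_py
  have h := pvRunA text.toList [] [] 0
  simp only [pvFinish] at h
  simp only [h, pvPrep_nil _ (pvSegs_ne_nil text.toList 0), List.nil_append]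

theorem pvStrip_ofList_nil : PySem.Str.strip (String.ofList ([] : List Char)) = "" := by decide

theorem pvEmit_filter (l : List (List Char)) :
    (pvEmit l).filter (fun a => a ≠ "")
      = (l.map (fun s => PySem.Str.strip (String.ofList s))).filter (fun a => a ≠ "") := by
  induction l with
  | nil => simp [pvEmit]
  | cons s ss ih =>
    by_cases h : s = []
    · subst h
      rw [pvEmit_nil_cons, List.map_cons, pvStrip_ofList_nil, List.filter_cons]
      simpa using ih
    · rw [pvEmit_cons _ _ h, List.map_cons, List.filter_cons, List.filter_cons]
      split_ifs with h2
      · rw [ih]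
      · rw [ih]

-- B-side reference: depth-0 comma positions and the slices between them
def pvCuts : List Char → Nat → Int → List Nat
  | [], _, _ => []
  | c :: cs, k, d =>
    if c = '(' ∨ c = '[' then pvCuts cs (k + 1) (d + 1)
    else if c = ')' ∨ c = ']' then pvCuts cs (k + 1) (d - 1)
    else if c = ',' ∧ d = 0 then k :: pvCuts cs (k + 1) d
    else pvCuts cs (k + 1) d

theorem pvCuts_ge (cs : List Char) : ∀ (k : Nat) (d : Int) (i : Nat), i ∈ pvCuts cs k d → k ≤ i := by
  induction cs with
  | nil => intro k d i h; simp [pvCuts] at h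
  | cons c cs ih =>
    intro k d i h
    simp only [pvCuts] at h
    split_ifs at h with h1 h2 h3
    · exact le_trans (Nat.le_succ k) (ih _ _ _ h)
    · exact le_trans (Nat.le_succ k) (ih _ _ _ h)
    · rcases List.mem_cons.mp h with h | h
      · omega
      · exact le_trans (Nat.le_succ k) (ih _ _ _ h)
    · exact le_trans (Nat.le_succ k) (ih _ _ _ h)

theorem pvCutFold (cs : List Char) : ∀ (k : Nat) (d : Int) (acc : List Int),
    ((PySem.List.enumerate cs (k : Int)).foldl pvStepCut (d, acc)).2
      = acc ++ (pvCuts cs k d).map (Nat.cast : Nat → Int) := by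
  induction cs with
  | nil => intro k d acc; simp [PySem.List.enumerate_nil, pvCuts]
  | cons c cs ih =>
    intro k d acc
    rw [PySem.List.enumerate_cons, List.foldl_cons,
        show (k : Int) + 1 = ((k + 1 : Nat) : Int) by push_cast; ring]
    simp only [pvStepCut, pvCuts]
    split_ifs with h1 h2 h3
    · exact ih (k + 1) (d + 1) acc
    · exact ih (k + 1) (d - 1) acc
    · rw [ih (k + 1) d (acc ++ [(k : Int)])]
      simp
    · exact ih (k + 1) d acc

def pvParts (text : String) : List Nat → Nat → List String
  | [], _ => []
  | i :: is, k =>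
    PySem.Str.strip (PySem.Str.slice text (some (k : Int)) (some (i : Int))) :: pvParts text is (i + 1)

theorem pvPartFold (text : String) (is : List Nat) : ∀ (k : Nat) (parts : List String),
    ((List.map (Nat.cast : Nat → Int) is).foldl (pvStepPart text) (parts, (k : Int))).1
      = parts ++ pvParts text is k := by
  induction is with
  | nil => intro k parts; simp [pvParts]
  | cons i is ih =>
    intro k parts
    rw [List.map_cons, List.foldl_cons]
    have hstep : pvStepPart text (parts, (k : Int)) (i : Int)
        = (parts ++ [PySem.Str.strip (PySem.Str.slice text (some (k : Int)) (some (i : Int)))],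
           ((i + 1 : Nat) : Int)) := by
      simp only [pvStepPart]
      norm_cast
    rw [hstep, ih (i + 1) _, pvParts, List.append_assoc]
    rfl

def pvRaw (full : List Char) : List Nat → Nat → List (List Char)
  | [], _ => []
  | i :: is, k => (full.drop k).take (i - k) :: pvRaw full is (i + 1)

theorem pvParts_eq_raw (text : String) (is : List Nat) : ∀ (k : Nat),
    pvParts text is k
      = (pvRaw text.toList is k).map (fun s => PySem.Str.strip (String.ofList s)) := by
  induction is with
  | nil => intro k; simp [pvParts, pvRaw]
  | cons i is ih =>
    intro k
    have hsl : PySem.Str.slice text (some (k : Int)) (some (i : Int))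
        = String.ofList ((text.toList.drop k).take (i - k)) := by
      unfold PySem.Str.slice
      rw [PySem.Chars.slice_eq_listSlice, PySem.List.slice_natCast]
    rw [pvParts, pvRaw, List.map_cons, hsl, ih (i + 1)]

theorem pvCore_step (full : List Char) (c : Char) (cs : List Char) (k : Nat) (d' : Int)
    (h : full.drop k = c :: cs) (hk : k < full.length) (h' : full.drop (k + 1) = cs)
    (ih : pvRaw full (pvCuts cs (k + 1) d' ++ [full.length]) (k + 1) = pvSegs cs d') :
    pvRaw full (pvCuts cs (k + 1) d' ++ [full.length]) k = pvConsHead c (pvSegs cs d') := by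
  obtain ⟨i, is, hL, hki⟩ : ∃ i is, pvCuts cs (k + 1) d' ++ [full.length] = i :: is ∧ k + 1 ≤ i := by
    cases hc : pvCuts cs (k + 1) d' with
    | nil => exact ⟨full.length, [], by simp [hc], by omega⟩
    | cons j rest =>
      exact ⟨j, rest ++ [full.length], by simp [hc], pvCuts_ge cs (k + 1) d' j (by simp [hc])⟩
  rw [hL] at ih ⊢
  rw [pvRaw] at ih ⊢
  rw [← ih]
  rw [h, show i - k = (i - (k + 1)) + 1 by omega, List.take_succ_cons, h']
  simp [pvConsHead]

theorem pvCore (full : List Char) (cs : List Char) : ∀ (k : Nat) (d : Int), full.drop k = cs →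
    pvRaw full (pvCuts cs k d ++ [full.length]) k = pvSegs cs d := by
  induction cs with
  | nil =>
    intro k d h
    simp [pvCuts, pvRaw, pvSegs, h]
  | cons c cs ih =>
    intro k d h
    have hk : k < full.length := by
      by_contra hle
      rw [List.drop_eq_nil_of_le (by omega)] at h
      simp at h
    have h' : full.drop (k + 1) = cs := by
      rw [← List.tail_drop, h]
      rfl
    by_cases h1 : c = '(' ∨ c = '['
    · rw [pvCuts, if_pos h1, pvSegs_open cs d c h1]
      exact pvCore_step full c cs k (d + 1) h hk h' (ih (k + 1) (d + 1) h')
    · by_cases h2 : c = ')' ∨ c = ']'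
      · rw [pvCuts, if_neg h1, if_pos h2, pvSegs_close cs d c h1 h2]
        exact pvCore_step full c cs k (d - 1) h hk h' (ih (k + 1) (d - 1) h')
      · by_cases h3 : c = ',' ∧ d = 0
        · rw [pvCuts, if_neg h1, if_neg h2, if_pos h3, pvSegs_comma cs d c h1 h2 h3,
              List.cons_append, pvRaw, Nat.sub_self, List.take_zero, ih (k + 1) d h']
        · rw [pvCuts, if_neg h1, if_neg h2, if_neg h3, pvSegs_other cs d c h1 h2 h3]
          exact pvCore_step full c cs k d h hk h' (ih (k + 1) d h')

-- ===== VERDICT (by name: the statement is the Claim_ definition above) =====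
theorem split_bracket_type_args_py_spec : Claim_equal_split_bracket_type_args_py := by
  intro text _
  unfold Spec_split_bracket_type_args_py
  rw [pvA_eq, pvEmit_filter]
  unfold split_bracket_type_args_py_alt
  have hcut := pvCutFold text.toList 0 0 []
  simp only [Nat.cast_zero, List.nil_append] at hcut
  have hmap : (pvCuts text.toList 0 0).map (Nat.cast : Nat → Int) ++ [(text.toList.length : Int)]
      = (pvCuts text.toList 0 0 ++ [text.toList.length]).map (Nat.cast : Nat → Int) := by
    simp
  have hpart := pvPartFold text (pvCuts text.toList 0 0 ++ [text.toList.length]) 0 []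
  simp only [Nat.cast_zero, List.nil_append] at hpart
  simp only [hcut, hmap, hpart]
  rw [pvParts_eq_raw, pvCore text.toList text.toList 0 0 (by simp)]
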